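-- pv_equiv track=rewrite | github.com/TheoRondon25/AlgoritmoMalgrange_Grafos | api/app.py | criar_grafo_por_categorias
-- ===== SOURCE A (Python) =====
-- def criar_grafo_por_categorias(pessoas_data):
--     """
--     Cria um grafo não direcionado onde pessoas são conectadas por interesses compartilhados.
--
--     Duas pessoas são conectadas no grafo se elas compartilham pelo menos uma categoria
--     de interesse. O grafo é representado como um dicionário de adjacências.
--
--     Args:
--         pessoas_data: Dicionário {nome_pessoa: [lista_de_interesses]}
--
--     Returns:
--         dict: Grafo representado como {pessoa: [lista_de_vizinhos]}
--     """
--     # Inicializa o grafo com todas as pessoas como vértices (sem vizinhos ainda)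
--     grafo = {pessoa: [] for pessoa in pessoas_data}
--     # Converte as chaves do dicionário em lista para iterar
--     pessoas_lista = list(pessoas_data.keys())
--
--     # Compara cada par de pessoas para verificar se compartilham interesses
--     for i, pessoa1 in enumerate(pessoas_lista):
--         # Compara pessoa1 com todas as pessoas que vêm depois dela (evita duplicatas)
--         for pessoa2 in pessoas_lista[i+1:]:
--             # Converte as listas de categorias em conjuntos para facilitar a comparação
--             categorias1 = set(pessoas_data[pessoa1])
--             categorias2 = set(pessoas_data[pessoa2])
--             # Verifica se há interseção entre os conjuntos (interesses em comum)
--             if categorias1 & categorias2: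
--                 # Se compartilham interesses, cria aresta bidirecional no grafo
--                 # Adiciona pessoa2 como vizinho de pessoa1
--                 if pessoa2 not in grafo[pessoa1]:
--                     grafo[pessoa1].append(pessoa2)
--                 # Adiciona pessoa1 como vizinho de pessoa2
--                 if pessoa1 not in grafo[pessoa2]:
--                     grafo[pessoa2].append(pessoa1)
--     return grafo
-- ===== SOURCE B (Python) =====
-- def criar_grafo_por_categorias(pessoas_data):
--     """Grafo de adjacencias: pessoas ligadas se compartilham alguma categoria.
--
--     Indice invertido categoria -> membros; o conjunto de vizinhos de cada
--     pessoa e construido uma unica vez, e a saida lista os vizinhos na ordem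
--     das chaves do dicionario (a mesma ordem que a comparacao par a par produz).
--     """
--     membros = {}
--     for pessoa, interesses in pessoas_data.items():
--         for cat in interesses:
--             membros.setdefault(cat, []).append(pessoa)
--     vizinhos = {pessoa: set() for pessoa in pessoas_data}
--     for grupo in membros.values():
--         for pessoa in grupo:
--             vizinhos[pessoa].update(grupo)
--     return {p: [q for q in pessoas_data if q != p and q in vizinhos[p]]
--             for p in pessoas_data}
-- ===== Notes on version B (the rewrite author's own statement) =====
-- stated objective: faster
-- what changed: Replaces the all-pairs loop that rebuilds both interest sets and intersects them for every pair by an inverted index category->members from which each person's neighbour set is built once, the adjacency lists being emitted by a single filter over the key order.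
import Mathlib
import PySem

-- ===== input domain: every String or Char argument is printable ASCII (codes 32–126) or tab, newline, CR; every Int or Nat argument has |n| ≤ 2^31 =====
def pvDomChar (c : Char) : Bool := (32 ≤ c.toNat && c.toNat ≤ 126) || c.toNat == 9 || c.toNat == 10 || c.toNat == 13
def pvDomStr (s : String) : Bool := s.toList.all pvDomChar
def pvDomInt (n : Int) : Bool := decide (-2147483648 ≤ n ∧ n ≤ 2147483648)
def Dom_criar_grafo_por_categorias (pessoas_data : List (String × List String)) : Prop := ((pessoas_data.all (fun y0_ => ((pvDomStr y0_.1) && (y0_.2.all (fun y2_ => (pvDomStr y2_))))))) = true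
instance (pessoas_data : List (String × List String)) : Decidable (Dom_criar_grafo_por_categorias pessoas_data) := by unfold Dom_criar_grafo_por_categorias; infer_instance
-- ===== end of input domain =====

-- B replaces A's all-pairs set-rebuilding-and-intersection loop by an inverted index
-- categoria -> membros from which each person's neighbour set is built once (objective: faster,
-- measurably so on the generated inputs).

-- ===== PORT A =====
-- Body of A's inner loop (one pair pessoa1/pessoa2); the Python 'if categorias1 & categorias2:'
-- (set truthiness) is the isEmpty test with the branches swapped.
def pvShareStepA (d : PySem.Dict String (List String)) (p1 : String)
    (g : PySem.Dict String (List String)) (p2 : String) : PySem.Dict String (List String) :=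
  let categorias1 := PySem.Set.ofList (d.getD p1 [])   -- pessoas_data[pessoa1]: key always present
  let categorias2 := PySem.Set.ofList (d.getD p2 [])
  if (PySem.Set.inter categorias1 categorias2).isEmpty then g
  else
    -- 'if pessoa2 not in grafo[pessoa1]: grafo[pessoa1].append(pessoa2)' (list mutation = insert back)
    let g := if (g.getD p1 []).contains p2 then g else g.insert p1 (g.getD p1 [] ++ [p2])
    if (g.getD p2 []).contains p1 then g else g.insert p2 (g.getD p2 [] ++ [p1])

def criar_grafo_por_categorias (pessoas_data : List (String × List String)) : List (String × List String) :=
  let d := PySem.Dict.ofList pessoas_data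
  -- grafo = {pessoa: [] for pessoa in pessoas_data}
  let grafo := d.keys.foldl (fun g pessoa => g.insert pessoa ([] : List String)) PySem.Dict.empty
  let pessoas_lista := d.keys
  -- for i, pessoa1 in enumerate(pessoas_lista): for pessoa2 in pessoas_lista[i+1:]: …
  ((PySem.List.enumerate pessoas_lista 0).foldl
    (fun g ip =>
      (PySem.List.slice pessoas_lista (some (ip.1 + 1)) none).foldl (pvShareStepA d ip.2) g)
    grafo).items

-- ===== PORT B =====
def criar_grafo_por_categorias_alt (pessoas_data : List (String × List String)) : List (String × List String) :=
  let d := PySem.Dict.ofList pessoas_data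
  -- membros = {}; for pessoa, interesses in …: for cat in interesses: membros.setdefault(cat, []).append(pessoa)
  let membros := d.items.foldl
    (fun m pi => pi.2.foldl (fun m cat => m.modify cat [] (· ++ [pi.1])) m) PySem.Dict.empty
  -- vizinhos = {pessoa: set() for pessoa in pessoas_data}
  let vizinhos0 := d.keys.foldl
    (fun v pessoa => v.insert pessoa (PySem.Set.empty : PySem.Set String)) PySem.Dict.empty
  -- for grupo in membros.values(): for pessoa in grupo: vizinhos[pessoa].update(grupo)
  let vizinhos := membros.values.foldl
    (fun v grupo => grupo.foldl
      (fun v pessoa => v.insert pessoa (PySem.Set.update (v.getD pessoa PySem.Set.empty) grupo)) v)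
    vizinhos0
  -- {p: [q for q in pessoas_data if q != p and q in vizinhos[p]] for p in pessoas_data}
  (d.keys.foldl
    (fun out p => out.insert p
      (d.keys.filter (fun q => q != p && PySem.Set.contains (vizinhos.getD p PySem.Set.empty) q)))
    PySem.Dict.empty).items

-- ===== PRECONDITION & SPEC =====
def Spec_criar_grafo_por_categorias (pessoas_data : List (String × List String)) (out : List (String × List String)) : Prop := out = criar_grafo_por_categorias_alt pessoas_data
instance (pessoas_data : List (String × List String)) (out : List (String × List String)) : Decidable (Spec_criar_grafo_por_categorias pessoas_data out) := by unfold Spec_criar_grafo_por_categorias; infer_instance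

-- ===== CLAIM (what is proved, stated in full; the proofs are below) =====
def Claim_equal_criar_grafo_por_categorias : Prop := ∀ (pessoas_data : List (String × List String)), Dom_criar_grafo_por_categorias pessoas_data → Spec_criar_grafo_por_categorias pessoas_data (criar_grafo_por_categorias pessoas_data)

-- ===== LEMMAS AND PROOFS =====

-- 'pessoa1 and pessoa2 share an interest category' as both ports test it
def pvShareB (d : PySem.Dict String (List String)) (p q : String) : Bool :=
  !(PySem.Set.inter (PySem.Set.ofList (d.getD p [])) (PySem.Set.ofList (d.getD q []))).isEmpty

lemma pvShareB_iff (d : PySem.Dict String (List String)) (p q : String) :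
    pvShareB d p q = true ↔ ∃ c, c ∈ d.getD p [] ∧ c ∈ d.getD q [] := by
  simp only [pvShareB, Bool.not_eq_true', List.isEmpty_eq_false_iff_exists_mem,
    PySem.Set.mem_inter, PySem.Set.mem_ofList]

lemma pvShareB_symm (d : PySem.Dict String (List String)) (p q : String) :
    pvShareB d p q = pvShareB d q p := by
  by_cases h : pvShareB d p q = true
  · have := (pvShareB_iff d p q).1 h
    rw [h, Eq.comm, pvShareB_iff]
    exact this.imp (fun c hc => ⟨hc.2, hc.1⟩)
  · rw [Bool.not_eq_true] at h
    rw [h, Eq.comm, ← Bool.not_eq_true, pvShareB_iff]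
    intro ⟨c, h1, h2⟩
    exact (Bool.eq_false_iff.1 h) ((pvShareB_iff d p q).2 ⟨c, h2, h1⟩)

-- A's nested pair loop as structural recursion
def pvRowA (d : PySem.Dict String (List String)) (x : String)
    (g : PySem.Dict String (List String)) (r : List String) : PySem.Dict String (List String) :=
  r.foldl (pvShareStepA d x) g

def pvPairsA (d : PySem.Dict String (List String))
    (g : PySem.Dict String (List String)) : List String → PySem.Dict String (List String)
  | [] => g
  | x :: r => pvPairsA d (pvRowA d x g r) r

-- the common value of both ports
def pvTarget (d : PySem.Dict String (List String)) : List (String × List String) :=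
  d.keys.map (fun p => (p, d.keys.filter (fun q => q != p && pvShareB d p q)))

lemma pvShareStepA_eq (d : PySem.Dict String (List String)) (x y : String)
    (g : PySem.Dict String (List String)) (hxy : x ≠ y)
    (h1 : y ∉ g.getD x []) (h2 : x ∉ g.getD y []) :
    pvShareStepA d x g y =
      if pvShareB d x y = true then (g.insert x (g.getD x [] ++ [y])).insert y (g.getD y [] ++ [x])
      else g := by
  unfold pvShareStepA pvShareB
  by_cases h : (PySem.Set.inter (PySem.Set.ofList (d.getD x [])) (PySem.Set.ofList (d.getD y []))).isEmpty = true
  · simp [h]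
  · have hgy : (g.insert x (g.getD x [] ++ [y])).getD y [] = g.getD y [] := by
      rw [PySem.Dict.getD_insert]
      simp [hxy.symm]
    simp [h, h1, h2, hgy]

lemma pvRowA_spec (d : PySem.Dict String (List String)) (x : String) :
    ∀ (r : List String) (g : PySem.Dict String (List String)),
      g.keys.Nodup → r.Nodup → x ∉ r →
      g.contains x = true → (∀ q ∈ r, g.contains q = true) →
      (∀ q ∈ r, q ∉ g.getD x []) → (∀ q ∈ r, x ∉ g.getD q []) →
      (pvRowA d x g r).keys = g.keys ∧
      (pvRowA d x g r).getD x [] = g.getD x [] ++ r.filter (fun q => pvShareB d x q) ∧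
      (∀ p, p ≠ x →
        (pvRowA d x g r).getD p [] =
          if p ∈ r ∧ pvShareB d x p = true then g.getD p [] ++ [x] else g.getD p []) := by
  intro r
  induction r with
  | nil =>
    intro g hk _ _ _ _ _ _
    refine ⟨rfl, by simp [pvRowA], fun p _ => by simp [pvRowA]⟩
  | cons y r' ih =>
    intro g hk hnd hxr hcx hcr hgx hgr
    have hxy : x ≠ y := fun h => hxr (h ▸ List.mem_cons_self)
    have hyr' : y ∉ r' := (List.nodup_cons.1 hnd).1
    have hnd' : r'.Nodup := (List.nodup_cons.1 hnd).2
    have hstep := pvShareStepA_eq d x y g hxy (hgx y List.mem_cons_self) (hgr y List.mem_cons_self)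
    have hrow : pvRowA d x g (y :: r') = pvRowA d x (pvShareStepA d x g y) r' := rfl
    by_cases hs : pvShareB d x y = true
    · -- the pair (x, y) shares a category: both adjacency lists grow
      rw [if_pos hs] at hstep
      set g' := (g.insert x (g.getD x [] ++ [y])).insert y (g.getD y [] ++ [x]) with hg'
      have hkeys' : g'.keys = g.keys := by
        rw [hg', PySem.Dict.keys_insert_of_contains, PySem.Dict.keys_insert_of_contains]
        · exact hcx
        · rw [PySem.Dict.contains_insert]
          simp [hcr y List.mem_cons_self]
      have hcont' : ∀ q, g'.contains q = g.contains q := by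
        intro q
        rw [hg', PySem.Dict.contains_insert, PySem.Dict.contains_insert]
        by_cases hq1 : q = y
        · simp [hq1, hcr y List.mem_cons_self]
        · by_cases hq2 : q = x
          · simp [hq2, hcx]
          · rw [beq_eq_false_iff_ne.2 hq1, beq_eq_false_iff_ne.2 hq2, Bool.false_or, Bool.false_or]
      have hgetD' : ∀ p, g'.getD p [] =
          if p = y then g.getD y [] ++ [x] else if p = x then g.getD x [] ++ [y] else g.getD p [] := by
        intro p
        rw [hg', PySem.Dict.getD_insert, PySem.Dict.getD_insert]
      have hgx' : g'.getD x [] = g.getD x [] ++ [y] := by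
        rw [hgetD' x, if_neg hxy, if_pos rfl]
      have ihh := ih g' (hkeys' ▸ hk) hnd' (fun h => hxr (List.mem_cons_of_mem _ h))
        (by rw [hcont']; exact hcx)
        (fun q hq => by rw [hcont']; exact hcr q (List.mem_cons_of_mem _ hq))
        (fun q hq => by
          have hqy : q ≠ y := fun h => hyr' (h ▸ hq)
          rw [hgx']
          simp only [List.mem_append, List.mem_singleton]
          rintro (h | h)
          · exact hgx q (List.mem_cons_of_mem _ hq) h
          · exact hqy h)
        (fun q hq => by
          have hqy : q ≠ y := fun h => hyr' (h ▸ hq)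
          have hqx : q ≠ x := fun h => hxr (h ▸ List.mem_cons_of_mem _ hq)
          rw [hgetD' q, if_neg hqy, if_neg hqx]
          exact hgr q (List.mem_cons_of_mem _ hq))
      obtain ⟨ik, ix, ip⟩ := ihh
      refine ⟨?_, ?_, ?_⟩
      · rw [hrow, hstep, ik, hkeys']
      · rw [hrow, hstep, ix, hgx']
        simp [hs]
      · intro p hp
        rw [hrow, hstep, ip p hp, hgetD' p]
        by_cases hpy : p = y
        · subst hpy
          simp [hyr', hs]
        · simp [hpy, hp]
    · -- no shared category: nothing changes for this pair
      rw [if_neg hs] at hstep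
      have ihh := ih g hk hnd' (fun h => hxr (List.mem_cons_of_mem _ h)) hcx
        (fun q hq => hcr q (List.mem_cons_of_mem _ hq))
        (fun q hq => hgx q (List.mem_cons_of_mem _ hq))
        (fun q hq => hgr q (List.mem_cons_of_mem _ hq))
      obtain ⟨ik, ix, ip⟩ := ihh
      refine ⟨?_, ?_, ?_⟩
      · rw [hrow, hstep, ik]
      · rw [hrow, hstep, ix]
        simp [hs]
      · intro p hp
        rw [hrow, hstep, ip p hp]
        by_cases hpy : p = y
        · subst hpy
          have hps : pvShareB d x p ≠ true := hs
          simp [hyr', hps]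
        · simp [hpy]

lemma pvPairsA_spec (d : PySem.Dict String (List String)) :
    ∀ (r : List String) (g : PySem.Dict String (List String)),
      g.keys.Nodup → r.Nodup →
      (∀ q ∈ r, g.contains q = true) →
      (∀ p q, p ∈ r → q ∈ r → q ∉ g.getD p []) →
      (pvPairsA d g r).keys = g.keys ∧
      (∀ p, (pvPairsA d g r).getD p [] =
        if p ∈ r then g.getD p [] ++ r.filter (fun q => q != p && pvShareB d p q)
        else g.getD p []) := by
  intro r
  induction r with
  | nil =>
    intro g _ _ _ _
    exact ⟨rfl, fun p => by simp [pvPairsA]⟩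
  | cons x r' ih =>
    intro g hk hnd hc hg
    have hxr' : x ∉ r' := (List.nodup_cons.1 hnd).1
    have hnd' : r'.Nodup := (List.nodup_cons.1 hnd).2
    obtain ⟨rk, rx, rp⟩ := pvRowA_spec d x r' g hk hnd' hxr'
      (hc x List.mem_cons_self)
      (fun q hq => hc q (List.mem_cons_of_mem _ hq))
      (fun q hq => hg x q List.mem_cons_self (List.mem_cons_of_mem _ hq))
      (fun q hq => hg q x (List.mem_cons_of_mem _ hq) List.mem_cons_self)
    obtain ⟨pk, pp⟩ := ih (pvRowA d x g r') (rk ▸ hk) hnd'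
      (fun q hq => by
        rw [PySem.Dict.contains_iff_mem_keys, rk, ← PySem.Dict.contains_iff_mem_keys]
        exact hc q (List.mem_cons_of_mem _ hq))
      (fun p q hp hq => by
        have hpx : p ≠ x := fun h => hxr' (h ▸ hp)
        have hqx : q ≠ x := fun h => hxr' (h ▸ hq)
        rw [rp p hpx]
        split_ifs with h
        · simp only [List.mem_append, List.mem_singleton]
          rintro (hmem | hmem)
          · exact hg p q (List.mem_cons_of_mem _ hp) (List.mem_cons_of_mem _ hq) hmem
          · exact hqx hmem
        · exact hg p q (List.mem_cons_of_mem _ hp) (List.mem_cons_of_mem _ hq))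
    have hpair : pvPairsA d g (x :: r') = pvPairsA d (pvRowA d x g r') r' := rfl
    refine ⟨hpair ▸ pk.trans rk, fun p => ?_⟩
    rw [hpair, pp p]
    by_cases hpx : p = x
    · subst hpx
      simp only [hxr', if_false, if_pos List.mem_cons_self]
      rw [rx]
      have : r'.filter (fun q => pvShareB d p q) = r'.filter (fun q => q != p && pvShareB d p q) := by
        apply List.filter_congr
        intro q hq
        have : q ≠ p := fun h => hxr' (h ▸ hq)
        simp [this]
      rw [List.filter_cons]
      simp [this]
    · rw [rp p hpx]
      by_cases hpr : p ∈ r'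
      · have hmem : p ∈ x :: r' := List.mem_cons_of_mem _ hpr
        rw [if_pos hpr, if_pos hmem, List.filter_cons]
        have hxp : (x != p) = true := by simp [Ne.symm hpx]
        rw [pvShareB_symm d p x]
        simp only [hpr, true_and, hxp, Bool.true_and]
        by_cases h : pvShareB d x p = true
        · simp [h, List.append_assoc]
        · simp [h]
      · have hmem : p ∉ x :: r' := by simp [hpx, hpr]
        simp [hpr, hmem]

lemma pvOuterA_eq (d : PySem.Dict String (List String)) (ks : List String) :
    ∀ (t : List String) (s : ℕ) (g : PySem.Dict String (List String)), t = ks.drop s →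
      (PySem.List.enumerate t (s : Int)).foldl
        (fun g ip => (PySem.List.slice ks (some (ip.1 + 1)) none).foldl (pvShareStepA d ip.2) g) g
      = pvPairsA d g t := by
  intro t
  induction t with
  | nil => intro s g _; simp [pvPairsA, PySem.List.enumerate_nil]
  | cons x r ih =>
    intro s g ht
    rw [PySem.List.enumerate_cons, List.foldl_cons]
    have hdrop : List.drop (s + 1) ks = r := by
      calc List.drop (s + 1) ks = (List.drop s ks).tail := List.tail_drop.symm
        _ = r := by rw [← ht]; rfl
    have hslice : PySem.List.slice ks (some ((s : Int) + 1)) none = r := by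
      rw [show ((s : Int) + 1) = ((s + 1 : ℕ) : Int) by push_cast; ring,
        PySem.List.slice_from_natCast, hdrop]
    have hih := ih (s + 1) (pvRowA d x g r) hdrop.symm
    push_cast at hih
    simp only [pvPairsA]
    simpa [pvRowA, hslice] using hih

lemma portA_eq_target (pessoas_data : List (String × List String)) :
    criar_grafo_por_categorias pessoas_data = pvTarget (PySem.Dict.ofList pessoas_data) := by
  unfold criar_grafo_por_categorias pvTarget
  dsimp only
  set d := PySem.Dict.ofList pessoas_data with hd
  set ks := d.keys with hks
  set grafo0 := ks.foldl (fun g pessoa => g.insert pessoa ([] : List String)) PySem.Dict.empty with hg0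
  have hknd : ks.Nodup := PySem.Dict.nodup_keys_ofList pessoas_data
  have h0 : grafo0.items = ks.map (fun p => (p, ([] : List String))) := by
    rw [hg0]
    have := PySem.Dict.items_foldl_insert_fresh ks (fun p => p) (fun _ => ([] : List String))
      PySem.Dict.empty (fun a _ => PySem.Dict.contains_empty a) (by simpa using hknd)
    simpa using this
  have hkeys0 : grafo0.keys = ks := by
    simp only [PySem.Dict.keys, h0, List.map_map, Function.comp_def]
    simp
  have hgetD0 : ∀ p ∈ ks, grafo0.getD p [] = [] := by
    intro p hp
    exact PySem.Dict.getD_of_mem_items grafo0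
      (by rw [h0]; exact List.mem_map.2 ⟨p, hp, rfl⟩) (hkeys0 ▸ hknd) []
  have houter := pvOuterA_eq d ks ks 0 grafo0 (List.drop_zero (l := ks)).symm
  rw [show ((0 : ℕ) : Int) = (0 : Int) by norm_num] at houter
  rw [houter]
  obtain ⟨pk, pp⟩ := pvPairsA_spec d ks grafo0 (hkeys0 ▸ hknd) hknd
    (fun q hq => (PySem.Dict.contains_iff_mem_keys _ _).2 (hkeys0 ▸ hq))
    (fun p q hp hq => by rw [hgetD0 p hp]; simp)
  rw [PySem.Dict.items_eq_map_keys _ (pk ▸ hkeys0 ▸ hknd) [], pk, hkeys0]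
  apply List.map_congr_left
  intro p hp
  rw [pp p, if_pos hp, hgetD0 p hp]
  simp

-- B side: the inverted index 'membros' maps each categoria to the people listed under it
lemma pvMembrosInner (p : String) :
    ∀ (cats : List String) (m : PySem.Dict String (List String)) (c : String),
      (cats.foldl (fun m cat => m.modify cat [] (· ++ [p])) m).getD c []
        = m.getD c [] ++ List.replicate (cats.count c) p := by
  intro cats
  induction cats with
  | nil => intro m c; simp
  | cons a cats' ih =>
    intro m c
    rw [List.foldl_cons, ih, PySem.Dict.getD_modify]
    by_cases h : c = a
    · subst h
      rw [if_pos rfl, List.count_cons_self]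
      simp [List.replicate_succ, List.append_assoc]
    · rw [if_neg h]
      congr 2
      simp [Ne.symm h]

lemma pvMembros_getD :
    ∀ (l : List (String × List String)) (m : PySem.Dict String (List String)) (c : String),
      (l.foldl (fun m pi => pi.2.foldl (fun m cat => m.modify cat [] (· ++ [pi.1])) m) m).getD c []
        = m.getD c [] ++ l.flatMap (fun pi => List.replicate (pi.2.count c) pi.1) := by
  intro l
  induction l with
  | nil => intro m c; simp
  | cons pi l' ih =>
    intro m c
    rw [List.foldl_cons, ih, pvMembrosInner, List.flatMap_cons, List.append_assoc]

lemma pvMembros_keys_nodup :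
    ∀ (l : List (String × List String)) (m : PySem.Dict String (List String)), m.keys.Nodup →
      (l.foldl (fun m pi => pi.2.foldl (fun m cat => m.modify cat [] (· ++ [pi.1])) m) m).keys.Nodup := by
  intro l
  induction l with
  | nil => intro m h; exact h
  | cons pi l' ih =>
    intro m h
    rw [List.foldl_cons]
    exact ih _ (PySem.Dict.nodup_keys_foldl_modify_key pi.2 (fun c => c) [] (fun _ _ => (· ++ [pi.1])) m h)

lemma mem_pvMembros (d : PySem.Dict String (List String)) (c q : String) :
    q ∈ (d.items.foldl (fun m pi => pi.2.foldl (fun m cat => m.modify cat [] (· ++ [pi.1])) m)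
          PySem.Dict.empty).getD c []
      ↔ ∃ cs, (q, cs) ∈ d.items ∧ c ∈ cs := by
  rw [pvMembros_getD]
  rw [PySem.Dict.getD_empty, List.nil_append, List.mem_flatMap]
  constructor
  · rintro ⟨pi, hpi, hq⟩
    obtain ⟨hcount, hq1⟩ := List.mem_replicate.1 hq
    refine ⟨pi.2, ?_, ?_⟩
    · rw [hq1]; simpa using hpi
    · exact List.count_pos_iff.1 (Nat.pos_of_ne_zero hcount)
  · rintro ⟨cs, hm, hc⟩
    refine ⟨(q, cs), hm, ?_⟩
    rw [List.mem_replicate]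
    exact ⟨Nat.pos_iff_ne_zero.1 (List.count_pos_iff.2 hc), rfl⟩

-- the per-category group loop grows each member's neighbour set by the whole group
lemma pvGrupoFold (grupo : List String) :
    ∀ (t : List String) (v : PySem.Dict String (PySem.Set String)) (p q : String),
      q ∈ (t.foldl (fun v pessoa =>
            v.insert pessoa (PySem.Set.update (v.getD pessoa PySem.Set.empty) grupo)) v).getD p PySem.Set.empty
        ↔ q ∈ v.getD p PySem.Set.empty ∨ (p ∈ t ∧ q ∈ grupo) := by
  intro t
  induction t with
  | nil => intro v p q; simp
  | cons y t' ih =>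
    intro v p q
    rw [List.foldl_cons, ih, PySem.Dict.getD_insert]
    by_cases h : p = y
    · subst h
      rw [if_pos rfl, PySem.Set.mem_update]
      simp only [List.mem_cons, true_or, true_and]
      tauto
    · rw [if_neg h]
      simp [h]

lemma pvVizFold :
    ∀ (gs : List (List String)) (v : PySem.Dict String (PySem.Set String)) (p q : String),
      q ∈ (gs.foldl (fun v grupo => grupo.foldl (fun v pessoa =>
              v.insert pessoa (PySem.Set.update (v.getD pessoa PySem.Set.empty) grupo)) v) v).getD p
            PySem.Set.empty
        ↔ q ∈ v.getD p PySem.Set.empty ∨ ∃ grupo ∈ gs, p ∈ grupo ∧ q ∈ grupo := by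
  intro gs
  induction gs with
  | nil => intro v p q; simp
  | cons g1 gs' ih =>
    intro v p q
    rw [List.foldl_cons, ih, pvGrupoFold]
    constructor
    · rintro ((h | h) | ⟨g2, hg2, hp, hq⟩)
      · exact Or.inl h
      · exact Or.inr ⟨g1, List.mem_cons_self, h⟩
      · exact Or.inr ⟨g2, List.mem_cons_of_mem _ hg2, hp, hq⟩
    · rintro (h | ⟨g2, hg2, hp, hq⟩)
      · exact Or.inl (Or.inl h)
      · rcases List.mem_cons.1 hg2 with h2 | h2
        · subst h2; exact Or.inl (Or.inr ⟨hp, hq⟩)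
        · exact Or.inr ⟨g2, h2, hp, hq⟩

lemma portB_eq_target (pessoas_data : List (String × List String)) :
    criar_grafo_por_categorias_alt pessoas_data = pvTarget (PySem.Dict.ofList pessoas_data) := by
  unfold criar_grafo_por_categorias_alt pvTarget
  dsimp only
  set d := PySem.Dict.ofList pessoas_data with hd
  set ks := d.keys with hks
  have hknd : ks.Nodup := PySem.Dict.nodup_keys_ofList pessoas_data
  set membros := d.items.foldl
    (fun m pi => pi.2.foldl (fun m cat => m.modify cat [] (· ++ [pi.1])) m) PySem.Dict.empty with hm
  set viz0 := ks.foldl (fun v pessoa => v.insert pessoa (PySem.Set.empty : PySem.Set String))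
    PySem.Dict.empty with hv0def
  set viz := membros.values.foldl (fun v grupo => grupo.foldl (fun v pessoa =>
      v.insert pessoa (PySem.Set.update (v.getD pessoa PySem.Set.empty) grupo)) v) viz0 with hvdef
  have hmnd : membros.keys.Nodup := pvMembros_keys_nodup d.items PySem.Dict.empty (by simp)
  -- the initial vizinhos dict maps every key to the empty set
  have h0items : viz0.items = ks.map (fun p => (p, ([] : PySem.Set String))) := by
    rw [hv0def]
    have := PySem.Dict.items_foldl_insert_fresh ks (fun p => p) (fun _ => ([] : PySem.Set String))
      PySem.Dict.empty (fun a _ => PySem.Dict.contains_empty a) (by simpa using hknd)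
    simpa using this
  have h0keys : viz0.keys = ks := by
    simp only [PySem.Dict.keys, h0items, List.map_map, Function.comp_def]
    simp
  have hv0 : ∀ p, viz0.getD p PySem.Set.empty = PySem.Set.empty := by
    intro p
    by_cases hp : p ∈ ks
    · exact PySem.Dict.getD_of_mem_items viz0
        (by rw [h0items]; exact List.mem_map.2 ⟨p, hp, rfl⟩) (h0keys ▸ hknd) _
    · refine PySem.Dict.getD_of_not_contains viz0 _ ?_
      rw [← Bool.not_eq_true, PySem.Dict.contains_iff_mem_keys, h0keys]
      exact hp
  -- membership in the final neighbour set is exactly "shares a category"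
  have hbridge : ∀ p q, (q ∈ viz.getD p PySem.Set.empty) ↔ pvShareB d p q = true := by
    intro p q
    rw [hvdef, pvVizFold, hv0 p]
    have hgetDmem : ∀ (p c : String), (∃ cs, (p, cs) ∈ d.items ∧ c ∈ cs) ↔ c ∈ d.getD p [] := by
      intro p c
      constructor
      · rintro ⟨cs, hmem, hc⟩
        rw [PySem.Dict.getD_of_mem_items d hmem hknd]
        exact hc
      · intro hc
        cases hg : d.get? p with
        | none =>
          rw [PySem.Dict.getD_eq_get?_getD, hg] at hc
          simp at hc
        | some cs =>
          exact ⟨cs, (PySem.Dict.get?_eq_some_iff_mem_items d p cs hknd).1 hg,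
            by rwa [PySem.Dict.getD_eq_get?_getD, hg] at hc⟩
    constructor
    · rintro (h | ⟨grupo, hg, hp, hq⟩)
      · simp [PySem.Set.empty] at h
      · rw [PySem.Dict.values_eq_map_keys membros hmnd []] at hg
        obtain ⟨c, _, hgc⟩ := List.mem_map.1 hg
        subst hgc
        rw [hm, mem_pvMembros] at hp hq
        rw [pvShareB_iff]
        obtain ⟨c1, h1⟩ := hp
        obtain ⟨c2, h2⟩ := hq
        exact ⟨c, (hgetDmem p c).1 ⟨c1, h1⟩, (hgetDmem q c).1 ⟨c2, h2⟩⟩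
    · intro h
      obtain ⟨c, hcp, hcq⟩ := (pvShareB_iff d p q).1 h
      have hpmem : p ∈ membros.getD c [] := by
        rw [hm, mem_pvMembros]; exact (hgetDmem p c).2 hcp
      have hqmem : q ∈ membros.getD c [] := by
        rw [hm, mem_pvMembros]; exact (hgetDmem q c).2 hcq
      refine Or.inr ⟨membros.getD c [], ?_, hpmem, hqmem⟩
      rw [PySem.Dict.values_eq_map_keys membros hmnd []]
      refine List.mem_map.2 ⟨c, ?_, rfl⟩
      rw [← PySem.Dict.contains_iff_mem_keys]
      cases hval : membros.contains c
      · rw [PySem.Dict.getD_of_not_contains membros [] hval] at hpmem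
        simp at hpmem
      · rfl
  -- emit the adjacency lists in key order
  have hitems : (ks.foldl (fun out p => out.insert p
        (ks.filter (fun q => q != p && PySem.Set.contains (viz.getD p PySem.Set.empty) q)))
      PySem.Dict.empty).items
      = ks.map (fun p => (p, ks.filter (fun q => q != p && PySem.Set.contains (viz.getD p PySem.Set.empty) q))) := by
    have := PySem.Dict.items_foldl_insert_fresh ks (fun p => p)
      (fun p => ks.filter (fun q => q != p && PySem.Set.contains (viz.getD p PySem.Set.empty) q))
      PySem.Dict.empty (fun a _ => PySem.Dict.contains_empty a) (by simpa using hknd)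
    simpa using this
  rw [hitems]
  apply List.map_congr_left
  intro p _
  congr 1
  apply List.filter_congr
  intro q _
  congr 1
  by_cases h : pvShareB d p q = true
  · rw [h]
    exact (PySem.Set.contains_iff _ _).2 ((hbridge p q).2 h)
  · rw [Bool.not_eq_true] at h
    rw [h, ← Bool.not_eq_true, PySem.Set.contains_iff]
    intro hq
    rw [(hbridge p q).1 hq] at h
    cases h

-- ===== VERDICT (by name: the statement is the Claim_ definition above) =====
theorem criar_grafo_por_categorias_spec : Claim_equal_criar_grafo_por_categorias := by
  intro pessoas_data _
  show _ = _
  rw [portA_eq_target, portB_eq_target]
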